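-- pv_equiv track=rewrite | github.com/Marianette/Image-Classification-with-Keras | train.py | generate_labels
-- ===== SOURCE A (Python) =====
-- def generate_labels(image_names):
--     label_set = []
--     for image in image_names:
--         if("cherry" in image):
--             label_set.append("cherry")
--         elif("strawberry" in image):
--             label_set.append("strawberry")
--         else:
--             label_set.append("tomato")
--     return label_set
-- ===== SOURCE B (Python) =====
-- def generate_labels(image_names):
--     # Painter's algorithm: start with the default everywhere, then overwrite
--     # in ascending priority; the final (cherry) pass wins over strawberry.
--     labels = ["tomato"] * len(image_names)
--     for kw in ("strawberry", "cherry"):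
--         for i, image in enumerate(image_names):
--             if kw in image:
--                 labels[i] = kw
--     return labels
-- ===== Notes on version B (the rewrite author's own statement) =====
-- stated objective: alternative
-- what changed: Replaces the per-item if/elif cascade by a staged overwrite (painter's) algorithm: a default-filled label array is built first and then each keyword pass overwrites matching positions in ascending priority order.
import Mathlib
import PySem

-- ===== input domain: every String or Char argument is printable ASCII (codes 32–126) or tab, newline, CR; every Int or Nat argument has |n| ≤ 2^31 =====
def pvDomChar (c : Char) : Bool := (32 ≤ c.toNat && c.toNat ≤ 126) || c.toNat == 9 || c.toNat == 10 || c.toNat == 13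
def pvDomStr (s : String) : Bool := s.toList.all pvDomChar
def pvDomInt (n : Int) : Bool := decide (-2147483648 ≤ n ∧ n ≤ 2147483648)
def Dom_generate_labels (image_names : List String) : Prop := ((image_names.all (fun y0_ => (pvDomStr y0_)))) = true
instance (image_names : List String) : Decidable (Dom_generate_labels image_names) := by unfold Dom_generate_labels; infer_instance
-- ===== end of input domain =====

-- B replaces A's per-item if/elif cascade by staged overwrite passes (default fill, then strawberry pass, then cherry pass); same cost, different decomposition.


-- ===== PORT A =====
def generate_labels (image_names : List String) : List String :=
  image_names.foldl (fun label_set image =>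
    if PySem.Str.isIn "cherry" image then label_set ++ ["cherry"]
    else if PySem.Str.isIn "strawberry" image then label_set ++ ["strawberry"]
    else label_set ++ ["tomato"]) []

-- ===== PORT B =====
-- one overwrite pass: for i, image in enumerate(image_names): if kw in image: labels[i] = kw
-- (enumerate indices are nonnegative Ints; .toNat is exact here, Python's labels[i] assignment = List.set)
def pvPass (kw : String) (image_names : List String) (labels : List String) : List String :=
  (PySem.List.enumerate image_names 0).foldl
    (fun lbls p => if PySem.Str.isIn kw p.2 then lbls.set p.1.toNat kw else lbls) labels

def generate_labels_alt (image_names : List String) : List String :=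
  pvPass "cherry" image_names
    (pvPass "strawberry" image_names (List.replicate image_names.length "tomato"))

-- ===== PRECONDITION & SPEC =====
def Spec_generate_labels (image_names : List String) (out : List String) : Prop := out = generate_labels_alt image_names
instance (image_names : List String) (out : List String) : Decidable (Spec_generate_labels image_names out) := by unfold Spec_generate_labels; infer_instance

-- ===== CLAIM (what is proved, stated in full; the proofs are below) =====
def Claim_equal_generate_labels : Prop := ∀ (image_names : List String), Dom_generate_labels image_names → Spec_generate_labels image_names (generate_labels image_names)

-- ===== LEMMAS AND PROOFS =====

-- an overwrite pass starting at index s+1 never touches the head of the label list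
theorem pvPass_shift (kw : String) (xs : List String) (s : Nat) (a : String) (ls : List String) :
    (PySem.List.enumerate xs ((s : Int) + 1)).foldl
      (fun lbls p => if PySem.Str.isIn kw p.2 then lbls.set p.1.toNat kw else lbls) (a :: ls)
    = a :: (PySem.List.enumerate xs (s : Int)).foldl
      (fun lbls p => if PySem.Str.isIn kw p.2 then lbls.set p.1.toNat kw else lbls) ls := by
  induction xs generalizing s a ls with
  | nil => simp [PySem.List.enumerate_nil]
  | cons x xs ih =>
    simp only [PySem.List.enumerate_cons, List.foldl]
    have h2 : ((s : Int) + 1 + 1) = ((s + 1 : Nat) : Int) + 1 := by push_cast; ring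
    have h3 : ((s : Int) + 1) = ((s + 1 : Nat) : Int) := by push_cast; ring
    rw [h2, h3]
    by_cases hc : PySem.Str.isIn kw x
    · rw [if_pos hc, if_pos hc, Int.toNat_natCast, Int.toNat_natCast]
      exact ih (s + 1) a (ls.set s kw)
    · rw [if_neg hc, if_neg hc]
      exact ih (s + 1) a ls

theorem pvPass_cons (kw x : String) (xs : List String) (l : String) (ls : List String) :
    pvPass kw (x :: xs) (l :: ls)
    = (if PySem.Str.isIn kw x then kw else l) :: pvPass kw xs ls := by
  unfold pvPass
  simp only [PySem.List.enumerate_cons, List.foldl]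
  by_cases hc : PySem.Str.isIn kw x
  · rw [if_pos hc, if_pos hc]
    simpa using pvPass_shift kw xs 0 kw ls
  · rw [if_neg hc, if_neg hc]
    simpa using pvPass_shift kw xs 0 l ls

theorem pvAlt_cons (x : String) (xs : List String) :
    generate_labels_alt (x :: xs)
    = (if PySem.Str.isIn "cherry" x then "cherry"
       else if PySem.Str.isIn "strawberry" x then "strawberry" else "tomato")
      :: generate_labels_alt xs := by
  unfold generate_labels_alt
  simp only [List.length_cons, List.replicate_succ, pvPass_cons]

theorem pvLoopA (xs : List String) (acc : List String) :
    xs.foldl (fun label_set image =>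
      if PySem.Str.isIn "cherry" image then label_set ++ ["cherry"]
      else if PySem.Str.isIn "strawberry" image then label_set ++ ["strawberry"]
      else label_set ++ ["tomato"]) acc
    = acc ++ generate_labels_alt xs := by
  induction xs generalizing acc with
  | nil => simp [generate_labels_alt, pvPass, PySem.List.enumerate_nil]
  | cons x xs ih => simp only [List.foldl, ih, pvAlt_cons]; split_ifs <;> simp

-- ===== VERDICT (by name: the statement is the Claim_ definition above) =====
theorem generate_labels_spec : Claim_equal_generate_labels := by
  intro image_names _
  unfold Spec_generate_labels generate_labels
  simpa using pvLoopA image_names []
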